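-- pv_equiv track=rewrite | github.com/elorisraeli/pythonProject1 | Mechina-Classes/functions.py | rectangle
-- ===== SOURCE A (Python) =====
-- def rectangle(width, height, sign):
--     line = ''
--     for i in range(width):
--         line += f'{sign}'
--     rectangle = ''
--     for x in range(height):
--         rectangle += f"{line}\n"
--     return rectangle
-- ===== SOURCE B (Python) =====
-- def rectangle(width, height, sign):
--     return (str(sign) * width + '\n') * height
-- ===== Notes on version B (the rewrite author's own statement) =====
-- stated objective: simpler
-- what changed: Replaces the two accumulation loops with a single closed-form string-multiplication expression (str(sign)*width + ' ')*height.
import Mathlib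
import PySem

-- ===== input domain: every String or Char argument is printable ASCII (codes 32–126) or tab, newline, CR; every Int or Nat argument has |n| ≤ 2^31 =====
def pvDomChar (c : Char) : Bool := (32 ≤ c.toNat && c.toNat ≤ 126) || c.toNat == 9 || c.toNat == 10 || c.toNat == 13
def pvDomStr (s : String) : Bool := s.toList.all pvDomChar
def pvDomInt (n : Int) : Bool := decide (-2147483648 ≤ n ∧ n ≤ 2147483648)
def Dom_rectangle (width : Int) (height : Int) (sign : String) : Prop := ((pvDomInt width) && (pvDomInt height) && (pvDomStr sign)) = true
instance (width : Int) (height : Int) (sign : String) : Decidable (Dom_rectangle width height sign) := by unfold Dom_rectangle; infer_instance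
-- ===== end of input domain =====

-- B replaces A's two accumulation loops with one closed-form string-multiplication expression.
-- ===== PORT A =====
def rectangle (width : Int) (height : Int) (sign : String) : String :=
  let line : List Char := (PySem.List.pyRange 0 width 1).foldl (fun acc _ => acc ++ sign.toList) []
  let rect : List Char := (PySem.List.pyRange 0 height 1).foldl (fun acc _ => acc ++ line ++ ['\n']) []
  String.ofList rect

-- ===== PORT B =====
def rectangle_alt (width : Int) (height : Int) (sign : String) : String :=
  String.ofList ((List.replicate height.toNat ((List.replicate width.toNat sign.toList).flatten ++ ['\n'])).flatten)

-- ===== PRECONDITION & SPEC =====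
def Spec_rectangle (width : Int) (height : Int) (sign : String) (out : String) : Prop := out = rectangle_alt width height sign
instance (width : Int) (height : Int) (sign : String) (out : String) : Decidable (Spec_rectangle width height sign out) := by unfold Spec_rectangle; infer_instance

-- ===== CLAIM (what is proved, stated in full; the proofs are below) =====
def Claim_equal_rectangle : Prop := ∀ (width : Int) (height : Int) (sign : String), Dom_rectangle width height sign → Spec_rectangle width height sign (rectangle width height sign)

-- ===== LEMMAS AND PROOFS =====

-- ===== VERDICT (by name: the statement is the Claim_ definition above) =====
-- foldl that appends a constant chunk per step = flatten of replicate
theorem foldl_const_append {α : Type} (t : List α) :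
    ∀ (l : List Int) (init : List α),
      l.foldl (fun acc (_ : Int) => acc ++ t) init = init ++ (List.replicate l.length t).flatten := by
  intro l
  induction l with
  | nil => simp
  | cons x xs ih => intro init; simp [List.foldl, ih, List.replicate_succ]

theorem rectangle_spec : Claim_equal_rectangle := by
  intro width height sign _
  unfold Spec_rectangle rectangle rectangle_alt
  simp only [foldl_const_append, PySem.List.length_pyRange_one, List.nil_append]
  norm_num
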